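-- pv_equiv track=rewrite | github.com/dev-amit-kumar/DSA | tgp/c4/coach-manish.py | solve
-- ===== SOURCE A (Python) =====
-- import math
--
-- def solve(d, n):
--     divisors = set()
--     for i in range(1, int(math.sqrt(d)) + 1):
--         if d % i == 0:
--             divisors.add(i)
--             divisors.add(d // i)
--     divisors = sorted(divisors, reverse=True)
--     for g in divisors:
--         if d // g >= n:
--             return g
--     return 1
-- ===== SOURCE B (Python) =====
-- import math
--
-- def solve(d, n):
--     # Invert to the cofactor: g divides d with d//g >= n  iff  k = d//g is a
--     # divisor of d with k >= n; the largest such g is d // (smallest such k).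
--     best = None  # smallest divisor of d that is >= n, so far
--     for i in range(1, int(math.sqrt(d)) + 1):
--         if d % i == 0:
--             for k in (i, d // i):
--                 if k >= n and (best is None or k < best):
--                     best = k
--     return d // best if best is not None else 1
-- ===== Notes on version B (the rewrite author's own statement) =====
-- stated objective: simpler
-- what changed: B inverts each divisor g to its cofactor k=d//g (the condition d//g>=n is exactly k>=n), so one pass over the same sqrt range keeps only the running minimum divisor >= n and returns d//best, dropping A's set and descending sort entirely.
import Mathlib
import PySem

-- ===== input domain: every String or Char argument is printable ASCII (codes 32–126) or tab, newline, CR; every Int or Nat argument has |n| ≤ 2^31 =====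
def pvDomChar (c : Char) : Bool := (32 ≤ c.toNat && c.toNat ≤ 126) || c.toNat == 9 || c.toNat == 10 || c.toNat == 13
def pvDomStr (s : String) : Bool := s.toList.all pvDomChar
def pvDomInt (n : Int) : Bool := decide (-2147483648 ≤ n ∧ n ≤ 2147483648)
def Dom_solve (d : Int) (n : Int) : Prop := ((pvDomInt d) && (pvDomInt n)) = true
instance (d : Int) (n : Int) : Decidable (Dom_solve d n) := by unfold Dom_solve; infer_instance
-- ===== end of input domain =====

-- B replaces A's collect-all-divisors/sort-descending/scan by a single pass that keeps the
-- minimum divisor k ≥ n (the cofactor of the answer) and returns d // k; return value only.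

-- ===== PORT A =====
-- int(math.sqrt(d)) : exact integer sqrt on the admitted domain 0 ≤ d ≤ 2^31
-- (the double sqrt is correctly rounded and cannot cross an integer there).
def pySqrtInt (d : Int) : Int := (Nat.sqrt d.toNat : Int)

-- the second 'for g in divisors: if d // g >= n: return g' loop, with the trailing 'return 1'
def solveScanA (d n : Int) : List Int → Int
  | [] => 1
  | g :: t => if n ≤ PySem.Int.floordiv d g then g else solveScanA d n t

def solve (d : Int) (n : Int) : Int :=
  let divisors : PySem.Set Int :=
    (PySem.List.pyRange 1 (pySqrtInt d + 1) 1).foldl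
      (fun st i => if PySem.Int.mod d i = 0
        then PySem.Set.add (PySem.Set.add st i) (PySem.Int.floordiv d i) else st)
      PySem.Set.empty
  solveScanA d n (PySem.List.sorted divisors (fun x => x) true)

-- ===== PORT B =====
-- 'if k >= n and (best is None or k < best): best = k'
def updMin (n : Int) (best : Option Int) (k : Int) : Option Int :=
  match best with
  | none => if n ≤ k then some k else none
  | some b => if n ≤ k ∧ k < b then some k else some b

def solve_alt (d : Int) (n : Int) : Int :=
  let best : Option Int :=
    (PySem.List.pyRange 1 (pySqrtInt d + 1) 1).foldl
      (fun best i => if PySem.Int.mod d i = 0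
        then [i, PySem.Int.floordiv d i].foldl (updMin n) best else best)
      none
  match best with
  | some b => PySem.Int.floordiv d b
  | none => 1

-- ===== PRECONDITION & SPEC =====
-- Pre_ excludes d < 0, on which math.sqrt(d) raises ValueError in A (and in B alike).
def Pre_solve (d : Int) (n : Int) : Prop := 0 ≤ d
instance (d : Int) (n : Int) : Decidable (Pre_solve d n) := by unfold Pre_solve; infer_instance
def pvWitness_solve : Int × Int := (12, 3)

def Spec_solve (d : Int) (n : Int) (out : Int) : Prop := out = solve_alt d n
instance (d : Int) (n : Int) (out : Int) : Decidable (Spec_solve d n out) := by unfold Spec_solve; infer_instance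

-- ===== CLAIM (what is proved, stated in full; the proofs are below) =====
def Claim_equal_solve : Prop := ∀ (d : Int) (n : Int), Dom_solve d n → Pre_solve d n → Spec_solve d n (solve d n)

-- ===== LEMMAS AND PROOFS =====

-- the common candidate stream both loops consume
def cand (d : Int) : List Int :=
  (PySem.List.pyRange 1 (pySqrtInt d + 1) 1).flatMap
    (fun i => if PySem.Int.mod d i = 0 then [i, PySem.Int.floordiv d i] else [])

theorem setA_eq (d : Int) :
    (PySem.List.pyRange 1 (pySqrtInt d + 1) 1).foldl
      (fun st i => if PySem.Int.mod d i = 0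
        then PySem.Set.add (PySem.Set.add st i) (PySem.Int.floordiv d i) else st)
      PySem.Set.empty = PySem.Set.ofList (cand d) := by
  unfold cand
  rw [PySem.Set.ofList_eq_foldl, List.foldl_flatMap]
  apply PySem.List.foldl_congr_mem
  intro acc i _
  split_ifs <;> rfl

theorem solveA_eq_scan_sorted_cand (d n : Int) :
    solve d n = solveScanA d n (PySem.List.sorted (PySem.Set.ofList (cand d)) (fun x => x) true) := by
  simp only [solve, setA_eq]

theorem solveB_eq_min_cand (d n : Int) :
    solve_alt d n = (match (cand d).foldl (updMin n) none with
                     | some b => PySem.Int.floordiv d b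
                     | none => 1) := by
  have h : (PySem.List.pyRange 1 (pySqrtInt d + 1) 1).foldl
      (fun best i => if PySem.Int.mod d i = 0
        then [i, PySem.Int.floordiv d i].foldl (updMin n) best else best)
      none = (cand d).foldl (updMin n) none := by
    unfold cand
    rw [List.foldl_flatMap]
    apply PySem.List.foldl_congr_mem
    intro acc i _
    split_ifs <;> rfl
  simp only [solve_alt, h]

theorem sqrt_bounds {d : Int} (hd : 0 < d) :
    pySqrtInt d * pySqrtInt d ≤ d ∧ d < (pySqrtInt d + 1) * (pySqrtInt d + 1) := by
  unfold pySqrtInt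
  have h1 := Nat.sqrt_le' d.toNat
  have h2 := Nat.lt_succ_sqrt' d.toNat
  have hc : ((d.toNat : Int)) = d := Int.toNat_of_nonneg hd.le
  constructor
  · have := (Int.ofNat_le.mpr h1); push_cast at this ⊢; nlinarith
  · have := (Int.ofNat_lt.mpr h2); push_cast at this ⊢; nlinarith

theorem mem_cand {d x : Int} (hd : 0 < d) : x ∈ cand d ↔ x ∣ d ∧ 1 ≤ x := by
  obtain ⟨hs1, hs2⟩ := sqrt_bounds hd
  simp only [cand, List.mem_flatMap, PySem.List.mem_pyRange_one]
  constructor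
  · rintro ⟨i, ⟨hi1, hi2⟩, hx⟩
    by_cases hmod : PySem.Int.mod d i = 0
    · have hdvd : i ∣ d := (PySem.Int.mod_eq_zero_iff_dvd d i).mp hmod
      simp [hmod] at hx
      obtain ⟨c, hc⟩ := hdvd
      have hcpos : 1 ≤ c := by nlinarith
      rcases hx with rfl | rfl
      · exact ⟨⟨c, hc⟩, hi1⟩
      · rw [PySem.Int.floordiv_eq_ediv_of_pos (by omega), hc,
          Int.mul_ediv_cancel_left _ (by omega : i ≠ 0)]
        exact ⟨⟨i, by linarith [hc, mul_comm i c]⟩, hcpos⟩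
    · simp [hmod] at hx
  · rintro ⟨hdvd, hx1⟩
    obtain ⟨c, hc⟩ := hdvd
    have hcpos : 1 ≤ c := by nlinarith
    by_cases hle : x ≤ pySqrtInt d
    · refine ⟨x, ⟨hx1, by omega⟩, ?_⟩
      have hmod : PySem.Int.mod d x = 0 :=
        (PySem.Int.mod_eq_zero_iff_dvd d x).mpr ⟨c, hc⟩
      simp [hmod]
    · refine ⟨c, ⟨hcpos, ?_⟩, ?_⟩
      · -- c ≤ sqrt: otherwise x*c ≥ (s+1)^2 > d
        by_contra hcc
        push Not at hcc
        nlinarith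
      · have hmod : PySem.Int.mod d c = 0 :=
        (PySem.Int.mod_eq_zero_iff_dvd d c).mpr ⟨x, by linarith [hc, mul_comm x c]⟩
        simp [hmod]
        right
        rw [PySem.Int.floordiv_eq_ediv_of_pos (by omega), hc, mul_comm x c,
          Int.mul_ediv_cancel_left _ (by omega : c ≠ 0)]

-- characterisation of B's running minimum
theorem foldl_updMin_none_aux (n : Int) (l : List Int) : ∀ bo : Option Int,
    l.foldl (updMin n) bo = none ↔ bo = none ∧ ∀ k ∈ l, k < n := by
  induction l with
  | nil => intro bo; simp
  | cons k t ih =>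
    intro bo
    rw [List.foldl_cons, ih]
    constructor
    · rintro ⟨hu, ht⟩
      cases bo with
      | none =>
        simp only [updMin] at hu
        by_cases h1 : n ≤ k
        · rw [if_pos h1] at hu; simp at hu
        · refine ⟨rfl, fun x hx => ?_⟩
          rcases List.mem_cons.mp hx with rfl | hx
          · omega
          · exact ht x hx
      | some b0 =>
        simp only [updMin] at hu
        by_cases h1 : n ≤ k ∧ k < b0
        · rw [if_pos h1] at hu; simp at hu
        · rw [if_neg h1] at hu; simp at hu
    · rintro ⟨rfl, hall⟩
      have hk : k < n := hall k (by simp)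
      simp only [updMin]
      rw [if_neg (by omega : ¬ n ≤ k)]
      exact ⟨rfl, fun x hx => hall x (List.mem_cons_of_mem _ hx)⟩

theorem foldl_updMin_none {n : Int} {l : List Int} :
    l.foldl (updMin n) none = none ↔ ∀ k ∈ l, k < n := by
  rw [foldl_updMin_none_aux]; simp

theorem foldl_updMin_some_aux (n : Int) (l : List Int) : ∀ (bo : Option Int) (m : Int),
    (∀ b, bo = some b → n ≤ b) →
    l.foldl (updMin n) bo = some m →
    (bo = some m ∨ (m ∈ l ∧ n ≤ m)) ∧ (∀ b, bo = some b → m ≤ b) ∧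
      (∀ k ∈ l, n ≤ k → m ≤ k) := by
  induction l with
  | nil =>
    intro bo m hb h
    simp only [List.foldl_nil] at h
    subst h
    exact ⟨Or.inl rfl, fun b hb' => by cases hb'; rfl, by simp⟩
  | cons k t ih =>
    intro bo m hb h
    simp only [List.foldl_cons] at h
    have hb' : ∀ b, updMin n bo k = some b → n ≤ b := by
      intro b hh
      cases bo with
      | none =>
        simp only [updMin] at hh
        by_cases h1 : n ≤ k
        · rw [if_pos h1] at hh; injection hh with hh; omega
        · rw [if_neg h1] at hh; simp at hh
      | some b0 =>
        simp only [updMin] at hh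
        have hb0 := hb b0 rfl
        by_cases h1 : n ≤ k ∧ k < b0
        · rw [if_pos h1] at hh; injection hh with hh; omega
        · rw [if_neg h1] at hh; injection hh with hh; omega
    obtain ⟨h1, h2, h3⟩ := ih _ m hb' h
    have hk : ∀ b, updMin n bo k = some b → m ≤ b := h2
    refine ⟨?_, ?_, ?_⟩
    · rcases h1 with h1 | h1
      · cases bo with
        | none =>
          simp only [updMin] at h1
          by_cases hnk : n ≤ k
          · rw [if_pos hnk] at h1; injection h1 with h1; subst h1
            exact Or.inr ⟨by simp, hnk⟩
          · rw [if_neg hnk] at h1; simp at h1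
        | some b0 =>
          simp only [updMin] at h1
          by_cases hnk : n ≤ k ∧ k < b0
          · rw [if_pos hnk] at h1; injection h1 with h1; subst h1
            exact Or.inr ⟨by simp, hnk.1⟩
          · rw [if_neg hnk] at h1; injection h1 with h1
            exact Or.inl (congrArg some h1)
      · exact Or.inr ⟨List.mem_cons_of_mem _ h1.1, h1.2⟩
    · intro b hbb
      subst hbb
      simp only [updMin] at hk
      by_cases hnk : n ≤ k ∧ k < b
      · have := hk k (by rw [if_pos hnk]); omega
      · exact hk b (by rw [if_neg hnk])
    · intro k' hk' hnk'
      rcases List.mem_cons.mp hk' with rfl | hk't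
      · cases hbo : bo with
        | none =>
          subst hbo
          simp only [updMin] at hk
          exact hk k' (by rw [if_pos hnk'])
        | some b0 =>
          subst hbo
          simp only [updMin] at hk
          by_cases hlt : k' < b0
          · exact hk k' (by rw [if_pos (⟨hnk', hlt⟩ : n ≤ k' ∧ k' < b0)])
          · have hmb0 := hk b0 (by rw [if_neg (fun h => hlt h.2)])
            omega
      · exact h3 k' hk't hnk'

theorem foldl_updMin_some {n m : Int} {l : List Int} (h : l.foldl (updMin n) none = some m) :
    m ∈ l ∧ n ≤ m ∧ ∀ k ∈ l, n ≤ k → m ≤ k := by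
  obtain ⟨h1, _, h3⟩ := foldl_updMin_some_aux n l none m (by simp) h
  rcases h1 with h1 | h1
  · cases h1
  · exact ⟨h1.1, h1.2, h3⟩

theorem scan_eq_one {d n : Int} {L : List Int} (h : ∀ g ∈ L, PySem.Int.floordiv d g < n) :
    solveScanA d n L = 1 := by
  induction L with
  | nil => rfl
  | cons g t ih =>
    have hg := h g (by simp)
    simp only [solveScanA, if_neg (by omega : ¬ n ≤ PySem.Int.floordiv d g)]
    exact ih (fun g' hg' => h g' (List.mem_cons_of_mem _ hg'))

theorem scan_eq_max {d n g : Int} {L : List Int} (hp : L.Pairwise (· > ·))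
    (hg : g ∈ L) (hsat : n ≤ PySem.Int.floordiv d g)
    (hmax : ∀ g' ∈ L, n ≤ PySem.Int.floordiv d g' → g' ≤ g) :
    solveScanA d n L = g := by
  induction L with
  | nil => cases hg
  | cons h0 t ih =>
    rcases List.mem_cons.mp hg with rfl | hgt
    · simp only [solveScanA, if_pos hsat]
    · have hgth0 : h0 > g := (List.pairwise_cons.mp hp).1 g hgt
      by_cases hs : n ≤ PySem.Int.floordiv d h0
      · have := hmax h0 (by simp) hs; omega
      · simp only [solveScanA, if_neg hs]
        exact ih (List.pairwise_cons.mp hp).2 hgt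
          (fun g' hg' hn => hmax g' (List.mem_cons_of_mem _ hg') hn)

theorem cofactor {d x : Int} (hd : 0 < d) (hdvd : x ∣ d) (hx : 1 ≤ x) :
    (d / x) ∣ d ∧ 1 ≤ d / x ∧ x * (d / x) = d := by
  obtain ⟨c, hc⟩ := hdvd
  have hcx : d / x = c := by rw [hc]; exact Int.mul_ediv_cancel_left _ (by omega)
  have hcpos : 1 ≤ c := by nlinarith
  refine ⟨⟨x, by rw [hcx, hc]; ring⟩, by omega, by rw [hcx, hc]⟩

-- ===== VERDICT (by name: the statement is the Claim_ definition above) =====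
theorem solve_spec : Claim_equal_solve := by
  intro d n _ hpre
  have hpre' : (0:Int) ≤ d := hpre
  show solve d n = solve_alt d n
  rw [solveA_eq_scan_sorted_cand, solveB_eq_min_cand]
  rcases eq_or_lt_of_le hpre' with hd | hd
  · -- d = 0 : no candidates on either side
    have h0 : cand d = [] := by rw [← hd]; decide
    rw [h0]
    rfl
  · have hmemC : ∀ x, x ∈ cand d ↔ x ∣ d ∧ 1 ≤ x := fun x => mem_cand hd
    have hmemL : ∀ x, x ∈ PySem.List.sorted (PySem.Set.ofList (cand d)) (fun x => x) true ↔
        x ∣ d ∧ 1 ≤ x := by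
      intro x
      rw [PySem.List.mem_sorted, PySem.Set.mem_ofList]
      exact hmemC x
    have hnodup : (PySem.List.sorted (PySem.Set.ofList (cand d)) (fun x => x) true).Nodup :=
      ((PySem.List.sorted_perm _ _ _).nodup_iff).mpr (PySem.Set.nodup_ofList (cand d))
    have hge : (PySem.List.sorted (PySem.Set.ofList (cand d)) (fun x => x) true).Pairwise
        (fun a b => b ≤ a) := PySem.List.sorted_pairwise_rev _ _
    have hgt : (PySem.List.sorted (PySem.Set.ofList (cand d)) (fun x => x) true).Pairwise
        (· > ·) := (hge.and hnodup).imp (fun h => lt_of_le_of_ne h.1 (fun e => h.2 e.symm))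
    rcases hbest : (cand d).foldl (updMin n) none with _ | m
    · -- no divisor ≥ n : both return 1
      simp only
      apply scan_eq_one
      intro g hgL
      obtain ⟨hgdvd, hg1⟩ := (hmemL g).mp hgL
      obtain ⟨hcd, hc1, _⟩ := cofactor hd hgdvd hg1
      have hlt : d / g < n := foldl_updMin_none.mp hbest _ ((hmemC _).mpr ⟨hcd, hc1⟩)
      rw [PySem.Int.floordiv_eq_ediv_of_pos (by omega)]
      omega
    · -- best divisor m ≥ n : A finds g* = d / m
      simp only
      obtain ⟨hmC, hnm, hmin⟩ := foldl_updMin_some hbest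
      obtain ⟨hmdvd, hm1⟩ := (hmemC m).mp hmC
      obtain ⟨hgd, hg1, hgm⟩ := cofactor hd hmdvd hm1
      have hdm : d / (d / m) = m := by
        calc d / (d / m) = (m * (d / m)) / (d / m) := by rw [hgm]
        _ = m := Int.mul_ediv_cancel _ (by omega)
      rw [PySem.Int.floordiv_eq_ediv_of_pos (by omega : (0:Int) < m)]
      apply scan_eq_max hgt
      · exact (hmemL _).mpr ⟨hgd, hg1⟩
      · rw [PySem.Int.floordiv_eq_ediv_of_pos (by omega : (0:Int) < d / m), hdm]
        exact hnm
      · intro g' hg' hng'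
        obtain ⟨hg'd, hg'1⟩ := (hmemL g').mp hg'
        obtain ⟨hkd, hk1, hkg⟩ := cofactor hd hg'd hg'1
        rw [PySem.Int.floordiv_eq_ediv_of_pos (by omega : (0:Int) < g')] at hng'
        have hmk : m ≤ d / g' := hmin _ ((hmemC _).mpr ⟨hkd, hk1⟩) hng'
        nlinarith [mul_le_mul_of_nonneg_left hmk (by omega : (0:Int) ≤ g')]
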